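-- pv_equiv track=rewrite | github.com/mdy3722/Python-AlgorithmStudy | Baekjoon/sinhanICT/find_k.py | find_min_k
-- ===== SOURCE A (Python) =====
-- arr = [-1, 0, 2, 7]
--
-- def find_min_k(arr):
--   min_val = min(arr)
--   max_val = max(arr)
--
--   k = 1
--
--   if min_val < 0:
--     while not (-2**(k-1) <= min_val and max_val <= 2**(k-1)):
--       k += 1
--   else:
--     while not (0 <= min_val and max_val <= 2**k - 1):
--             k += 1
--
--   return k
-- ===== SOURCE B (Python) =====
-- def find_min_k(arr):
--   lo = min(arr)
--   hi = max(arr)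
--   if lo < 0:
--     need = max(-lo, hi)          # >= 1 since lo < 0
--     return 1 + (need - 1).bit_length()
--   return max(1, hi.bit_length())
-- ===== Notes on version B (the rewrite author's own statement) =====
-- stated objective: simpler
-- what changed: Replaces A's incrementing trial loop over candidate widths k with a closed-form answer computed directly from int.bit_length of max(-lo, hi), handling the signed and unsigned cases each in one expression.
import Mathlib
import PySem

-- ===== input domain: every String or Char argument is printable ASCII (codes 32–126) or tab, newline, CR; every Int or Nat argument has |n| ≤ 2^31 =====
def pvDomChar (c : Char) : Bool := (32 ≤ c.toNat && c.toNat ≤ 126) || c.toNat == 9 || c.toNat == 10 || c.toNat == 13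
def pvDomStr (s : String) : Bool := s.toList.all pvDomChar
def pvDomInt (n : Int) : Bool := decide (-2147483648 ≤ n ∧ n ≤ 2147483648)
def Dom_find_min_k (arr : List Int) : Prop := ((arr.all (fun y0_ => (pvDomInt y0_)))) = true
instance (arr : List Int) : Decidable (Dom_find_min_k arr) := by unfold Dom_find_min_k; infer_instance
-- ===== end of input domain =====

-- B replaces A's incrementing trial loop by a closed form via bit_length: simpler (no loop).
-- A raises ValueError on [], and so does B (min of empty sequence): Pre_ excludes the empty list.

-- ===== PORT A =====
-- A's while-loop in the negative branch: k starts at 1 and increments until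
-- -2^(k-1) ≤ m ∧ M ≤ 2^(k-1).  Fuel only makes the recursion total; under Dom it never runs out.
def findLoopNeg (m M : Int) : Nat → Int → Int
  | 0, k => k
  | fuel + 1, k =>
      if -(2 ^ (k - 1).toNat) ≤ m ∧ M ≤ 2 ^ (k - 1).toNat then k
      else findLoopNeg m M fuel (k + 1)

-- A's while-loop in the non-negative branch: increments k until 0 ≤ m ∧ M ≤ 2^k - 1.
def findLoopPos (m M : Int) : Nat → Int → Int
  | 0, k => k
  | fuel + 1, k =>
      if 0 ≤ m ∧ M ≤ 2 ^ k.toNat - 1 then k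
      else findLoopPos m M fuel (k + 1)

def find_min_k (arr : List Int) : Int :=
  match PySem.List.min? arr (fun x => x), PySem.List.max? arr (fun x => x) with
  | some m, some M => if m < 0 then findLoopNeg m M 64 1 else findLoopPos m M 64 1
  | _, _ => 0   -- unreachable: Python raises ValueError on [], excluded by Pre_

-- ===== PORT B =====
-- Python's nonneg_int.bit_length() is Nat.size.
def pyBitLength (n : Int) : Int := Int.ofNat (Nat.size n.toNat)

def find_min_k_alt (arr : List Int) : Int :=
  let lo := (PySem.List.min? arr (fun x => x)).getD 0   -- [] raises in Python; excluded by Pre_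
  let hi := (PySem.List.max? arr (fun x => x)).getD 0
  if lo < 0 then
    let need := max (-lo) hi
    1 + pyBitLength (need - 1)
  else max 1 (pyBitLength hi)

-- ===== PRECONDITION & SPEC =====
-- A (and B) raise ValueError on the empty list: exactly that input is excluded.
def Pre_find_min_k (arr : List Int) : Prop := arr ≠ []
instance (arr : List Int) : Decidable (Pre_find_min_k arr) := by unfold Pre_find_min_k; infer_instance
def pvWitness_find_min_k : List Int := [-1, 0, 2, 7]

def Spec_find_min_k (arr : List Int) (out : Int) : Prop := out = find_min_k_alt arr
instance (arr : List Int) (out : Int) : Decidable (Spec_find_min_k arr out) := by unfold Spec_find_min_k; infer_instance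

-- ===== CLAIM (what is proved, stated in full; the proofs are below) =====
def Claim_equal_find_min_k : Prop := ∀ (arr : List Int), Dom_find_min_k arr → Pre_find_min_k arr → Spec_find_min_k arr (find_min_k arr)

-- ===== LEMMAS AND PROOFS =====

-- Generic exit lemma for A's two loops: if kB is the least k ≥ k0 satisfying the loop
-- condition and the fuel reaches it, the loop returns kB.
theorem findLoopNeg_eq (m M kB : Int) (fuel : Nat) :
    ∀ k : Int, k ≤ kB →
      (-(2 ^ (kB - 1).toNat) ≤ m ∧ M ≤ 2 ^ (kB - 1).toNat) →
      (∀ j : Int, k ≤ j → j < kB → ¬(-(2 ^ (j - 1).toNat) ≤ m ∧ M ≤ 2 ^ (j - 1).toNat)) →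
      kB ≤ k + fuel →
      findLoopNeg m M fuel k = kB := by
  induction fuel with
  | zero =>
      intro k hk hc _ hf
      simp [findLoopNeg]; omega
  | succ n ih =>
      intro k hk hc hmin hf
      by_cases h : -(2 ^ (k - 1).toNat) ≤ m ∧ M ≤ 2 ^ (k - 1).toNat
      · have hkeq : k = kB := by
          by_contra hne
          exact hmin k le_rfl (lt_of_le_of_ne hk hne) h
        subst hkeq
        simp only [findLoopNeg, if_pos h]
      · have hkk : k < kB := by
          rcases lt_or_eq_of_le hk with h' | h'
          · exact h'
          · exact absurd (h' ▸ hc) h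
        simp only [findLoopNeg, if_neg h]
        exact ih (k + 1) (by omega) hc (fun j hj hj' => hmin j (by omega) hj') (by omega)

theorem findLoopPos_eq (m M kB : Int) (fuel : Nat) :
    ∀ k : Int, k ≤ kB →
      (0 ≤ m ∧ M ≤ 2 ^ kB.toNat - 1) →
      (∀ j : Int, k ≤ j → j < kB → ¬(0 ≤ m ∧ M ≤ 2 ^ j.toNat - 1)) →
      kB ≤ k + fuel →
      findLoopPos m M fuel k = kB := by
  induction fuel with
  | zero =>
      intro k hk hc _ hf
      simp [findLoopPos]; omega
  | succ n ih =>
      intro k hk hc hmin hf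
      by_cases h : 0 ≤ m ∧ M ≤ 2 ^ k.toNat - 1
      · have hkeq : k = kB := by
          by_contra hne
          exact hmin k le_rfl (lt_of_le_of_ne hk hne) h
        subst hkeq
        simp only [findLoopPos, if_pos h]
      · have hkk : k < kB := by
          rcases lt_or_eq_of_le hk with h' | h'
          · exact h'
          · exact absurd (h' ▸ hc) h
        simp only [findLoopPos, if_neg h]
        exact ih (k + 1) (by omega) hc (fun j hj hj' => hmin j (by omega) hj') (by omega)

-- n < 2^(size n), and size is the least such exponent
theorem size_min (n t : Nat) (h : t < Nat.size n) : 2 ^ t ≤ n := by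
  by_contra h'
  have hsz : Nat.size n ≤ t := Nat.size_le.2 (by omega)
  omega

-- Int version: for 1 ≤ N, 2^(size (N-1).toNat) is the least power of two ≥ N
theorem pow_size_ge (N : Int) (h1 : 1 ≤ N) : N ≤ 2 ^ Nat.size (N - 1).toNat := by
  have h : ((N - 1).toNat : Int) < ((2 ^ Nat.size (N - 1).toNat : Nat) : Int) :=
    Int.ofNat_lt.2 (Nat.lt_size_self _)
  push_cast at h
  omega

theorem pow_lt_of_lt_size (N : Int) (t : Nat) (h1 : 1 ≤ N) (ht : t < Nat.size (N - 1).toNat) :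
    (2 : Int) ^ t < N := by
  have h : ((2 ^ t : Nat) : Int) ≤ (((N - 1).toNat : Nat) : Int) := Int.ofNat_le.2 (size_min (N - 1).toNat t ht)
  push_cast at h
  omega

theorem size_le_of_le (n b : Nat) (h : n < 2 ^ b) : Nat.size n ≤ b := Nat.size_le.2 h

-- ===== VERDICT (by name: the statement is the Claim_ definition above) =====
theorem find_min_k_spec : Claim_equal_find_min_k := by
  intro arr hdom hpre
  unfold Spec_find_min_k find_min_k find_min_k_alt
  obtain ⟨m, hm⟩ : ∃ m, PySem.List.min? arr (fun x => x) = some m := by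
    cases h : PySem.List.min? arr (fun x => x) with
    | none => exact absurd ((PySem.List.min?_eq_none_iff arr (fun x => x)).1 h) hpre
    | some m => exact ⟨m, rfl⟩
  obtain ⟨M, hM⟩ : ∃ M, PySem.List.max? arr (fun x => x) = some M := by
    cases h : PySem.List.max? arr (fun x => x) with
    | none => exact absurd ((PySem.List.max?_eq_none_iff arr (fun x => x)).1 h) hpre
    | some M => exact ⟨M, rfl⟩
  have hmMem : m ∈ arr := PySem.List.min?_mem hm
  have hMMem : M ∈ arr := PySem.List.max?_mem hM
  have hmM : m ≤ M := by
    have := PySem.List.max?_isMax hM m hmMem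
    simpa using this
  have hdm : -2147483648 ≤ m ∧ m ≤ 2147483648 := by
    have := List.all_eq_true.1 hdom m hmMem
    simpa [pvDomInt] using this
  have hdM : -2147483648 ≤ M ∧ M ≤ 2147483648 := by
    have := List.all_eq_true.1 hdom M hMMem
    simpa [pvDomInt] using this
  rw [hm, hM]
  simp only [Option.getD_some]
  by_cases hneg : m < 0
  · simp only [if_pos hneg]
    set N : Int := max (-m) M with hN
    have hN1 : 1 ≤ N := le_trans (by omega) (le_max_left (-m) M)
    set s : Nat := Nat.size (N - 1).toNat with hs
    have hkB : (1 : Int) + pyBitLength (N - 1) = 1 + (s : Int) := by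
      simp [pyBitLength, hs]
    rw [hkB]
    have hge : N ≤ (2 : Int) ^ s := by rw [hs]; exact pow_size_ge N hN1
    -- show the loop exits exactly at kB = 1 + s
    apply findLoopNeg_eq m M (1 + (s : Int)) 64 1
    · omega
    · have hexp : ((1 : Int) + (s : Int) - 1).toNat = s := by omega
      rw [hexp]
      have h1 : -m ≤ N := le_max_left _ _
      have h2 : M ≤ N := le_max_right _ _
      constructor
      · omega
      · omega
    · intro j hj hj' hcond
      have ht : (j - 1).toNat < s := by omega
      rw [hs] at ht
      have hlt := pow_lt_of_lt_size N (j - 1).toNat hN1 ht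
      obtain ⟨h1, h2⟩ := hcond
      have hNle : N ≤ 2 ^ (j - 1).toNat := max_le (by omega) h2
      omega
    · -- fuel: s ≤ 31 since N ≤ 2^31
      have hsle : s ≤ 31 := by
        rw [hs]
        apply size_le_of_le
        have hNle : N ≤ 2147483648 := by omega
        have h31 : ((2 ^ 31 : Nat) : Int) = 2147483648 := by norm_num
        omega
      omega
  · simp only [if_neg hneg]
    have hm0 : 0 ≤ m := by omega
    have hM0 : 0 ≤ M := le_trans hm0 hmM
    set s : Nat := Nat.size M.toNat with hs
    have hkB : max 1 (pyBitLength M) = max 1 ((s : Nat) : Int) := by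
      simp [pyBitLength, hs]
    rw [hkB]
    apply findLoopPos_eq m M (max 1 ((s : Nat) : Int)) 64 1
    · omega
    · refine ⟨hm0, ?_⟩
      have hexp : (max 1 ((s : Nat) : Int)).toNat = max 1 s := by omega
      rw [hexp]
      have hlt0 : M.toNat < 2 ^ s := by rw [hs]; exact Nat.lt_size_self M.toNat
      have hlt : M.toNat < 2 ^ max 1 s :=
        lt_of_lt_of_le hlt0 (Nat.pow_le_pow_right (by norm_num) (le_max_right _ _))
      have hc := Int.ofNat_lt.2 hlt
      push_cast at hc
      omega
    · intro j hj hj' hcond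
      have ht : j.toNat < s := by omega
      rw [hs] at ht
      have h1 := size_min M.toNat j.toNat ht
      have h2 := Int.ofNat_le.2 h1
      push_cast at h2
      obtain ⟨_, h3⟩ := hcond
      omega
    · have hsle : s ≤ 32 := by
        rw [hs]
        apply size_le_of_le
        have h32 : (2 ^ 32 : Nat) = 4294967296 := by norm_num
        omega
      omega
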